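-- pv_equiv track=rewrite | github.com/primrose101/CS322 | finite_state_machines/keywords.py | kwcomma_fsm
-- ===== SOURCE A (Python) =====
-- def kwcomma_fsm(string_input, index):
--     i = index
--
--     table = [
--         [1, 2],
--         [2, 2],
--         [2, 2],
--
--     ]
--
--     state = 0
--     inputstate = 0
--
--     string_length = len(string_input)
--
--     while i != string_length:
--         if string_input[i] == ',':
--             inputstate = 0
--         else:
--             inputstate = 1
--
--         state = table[state][inputstate]
--
--         if state == 2:
--             break
--
--         i += 1
--
--     return i - index
-- ===== SOURCE B (Python) =====
-- def kwcomma_fsm(string_input, index):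
--     # The FSM only ever inspects the character at `index`: a comma there means
--     # one character is consumed, anything else (or index == len) means zero.
--     if index != len(string_input) and string_input[index] == ',':
--         return 1
--     return 0
-- ===== Notes on version B (the rewrite author's own statement) =====
-- stated objective: simpler
-- what changed: Replaced the transition-table while loop by a closed-form single-character test: return 1 iff index != len and string_input[index] == ',', else 0.
import Mathlib
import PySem

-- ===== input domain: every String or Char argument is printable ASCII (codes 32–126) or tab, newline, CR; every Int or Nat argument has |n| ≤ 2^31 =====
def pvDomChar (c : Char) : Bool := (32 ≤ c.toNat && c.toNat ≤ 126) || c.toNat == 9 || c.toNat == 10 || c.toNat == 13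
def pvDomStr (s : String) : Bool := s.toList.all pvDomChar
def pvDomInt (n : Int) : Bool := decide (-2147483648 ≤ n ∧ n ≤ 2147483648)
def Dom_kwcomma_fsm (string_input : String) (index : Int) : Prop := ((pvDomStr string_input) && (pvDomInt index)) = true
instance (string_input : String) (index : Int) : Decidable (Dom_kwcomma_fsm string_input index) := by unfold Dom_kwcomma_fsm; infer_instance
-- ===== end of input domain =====

-- B replaces A's transition-table while loop by a closed-form test of the single
-- character at `index` (objective: simpler); A = B wherever the Python A returns.


-- ===== PORT A =====
-- the while loop of A; `fuel` is only a totality guard (outside Pre_ the Python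
-- loop raises IndexError, modelled by the `none` branch returning early).
def kwcommaLoop (cs : List Char) (string_length : Int) (state : Nat) (i : Int) :
    Nat → Int
  | 0 => i
  | fuel + 1 =>
    if i = string_length then i
    else
      match PySem.List.pyGet? cs i with
      | none => i          -- string_input[i] raises IndexError here (excluded by Pre_)
      | some c =>
        let inputstate : Nat := if c = ',' then 0 else 1
        let table : List (List Nat) := [[1, 2], [2, 2], [2, 2]]
        let state' : Nat := (table.getD state []).getD inputstate 0
        if state' = 2 then i
        else kwcommaLoop cs string_length state' (i + 1) fuel

def kwcomma_fsm (string_input : String) (index : Int) : Int :=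
  kwcommaLoop string_input.toList (string_input.toList.length : Int) 0 index
    (((string_input.toList.length : Int) - index).toNat + 1) - index

-- ===== PORT B =====
def kwcomma_fsm_alt (string_input : String) (index : Int) : Int :=
  if index ≠ (string_input.toList.length : Int) ∧
      PySem.List.pyGet? string_input.toList index = some ',' then 1 else 0

-- ===== PRECONDITION & SPEC =====
-- Pre_ excludes exactly the inputs on which Python A raises IndexError:
-- index must be a valid (possibly negative) position, or equal to the length.
def Pre_kwcomma_fsm (string_input : String) (index : Int) : Prop :=
  PySem.Raise.InRange string_input.toList.length index ∨
    index = (string_input.toList.length : Int)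
instance (string_input : String) (index : Int) : Decidable (Pre_kwcomma_fsm string_input index) := by unfold Pre_kwcomma_fsm; infer_instance

def pvWitness_kwcomma_fsm : String × Int := ("a,b", 1)

def Spec_kwcomma_fsm (string_input : String) (index : Int) (out : Int) : Prop := out = kwcomma_fsm_alt string_input index
instance (string_input : String) (index : Int) (out : Int) : Decidable (Spec_kwcomma_fsm string_input index out) := by unfold Spec_kwcomma_fsm; infer_instance

-- ===== CLAIM (what is proved, stated in full; the proofs are below) =====
def Claim_equal_kwcomma_fsm : Prop := ∀ (string_input : String) (index : Int), Dom_kwcomma_fsm string_input index → Pre_kwcomma_fsm string_input index → Spec_kwcomma_fsm string_input index (kwcomma_fsm string_input index)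

-- ===== LEMMAS AND PROOFS =====

theorem kwcomma_fsm_eq (s : String) (index : Int)
    (hpre : Pre_kwcomma_fsm s index) :
    kwcomma_fsm s index = kwcomma_fsm_alt s index := by
  unfold kwcomma_fsm kwcomma_fsm_alt
  set cs := s.toList with hcs
  set L : Int := (cs.length : Int) with hL
  rcases hpre with hin | heq
  · -- index is a valid position: -len ≤ index < len
    have hrange : -(cs.length:Int) ≤ index ∧ index < cs.length := by simpa [PySem.Raise.InRange] using hin
    have hne : index ≠ L := by omega
    obtain ⟨c, hc⟩ : ∃ c, PySem.List.pyGet? cs index = some c := by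
      rcases h : PySem.List.pyGet? cs index with _ | c
      · exact absurd ((PySem.List.pyGet?_eq_none_iff cs index).mp h)
          (not_not_intro (by simpa using hin))
      · exact ⟨c, rfl⟩
    have hfuel : ∃ f, (L - index).toNat + 1 = f + 2 := ⟨(L - index).toNat - 1, by omega⟩
    obtain ⟨f, hf⟩ := hfuel
    rw [hf]
    by_cases hcomma : c = ','
    · -- first char is a comma: state becomes 1, loop advances once, then stops
      subst hcomma
      simp only [kwcommaLoop, if_neg hne, hc, List.getD, reduceIte]
      simp only [List.getElem?_cons_zero, List.getElem?_cons_succ, Option.getD_some]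
      by_cases hend : index + 1 = L
      · simp [hend, hne]
        omega
      · have hin1 : PySem.Raise.InRange cs.length (index + 1) := by
          simp only [PySem.Raise.InRange]; omega
        obtain ⟨c1, hc1⟩ : ∃ c1, PySem.List.pyGet? cs (index + 1) = some c1 := by
          rcases h : PySem.List.pyGet? cs (index + 1) with _ | c1
          · exact absurd ((PySem.List.pyGet?_eq_none_iff cs (index + 1)).mp h)
              (not_not_intro (by simpa using hin1))
          · exact ⟨c1, rfl⟩
        cases f with
        | zero => omega  -- impossible: index + 1 ≠ L means L - index ≥ 2
        | succ f' =>
          simp only [kwcommaLoop, if_neg hend, hc1]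
          by_cases hc1comma : c1 = ',' <;>
            simp [hc1comma] <;> omega
    · -- first char is not a comma: state becomes 2, break immediately, return 0
      simp [kwcommaLoop, hne, hc, hcomma, List.getD]
  · -- index = len: loop body never runs, A returns 0; B returns 0
    have hifcond : index = L := by simpa using heq
    simp [kwcommaLoop, hifcond]

-- ===== VERDICT (by name: the statement is the Claim_ definition above) =====
theorem kwcomma_fsm_spec : Claim_equal_kwcomma_fsm := by
  intro s index _ hpre
  unfold Spec_kwcomma_fsm
  exact kwcomma_fsm_eq s index hpre
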